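-- pv_equiv track=rewrite | github.com/philipsltd/ros2_lab3 | src/goals_and_navigation/goals_and_navigation/cone_detection.py | find_biggest_smallest_rectangles
-- ===== SOURCE A (Python) =====
-- def find_biggest_smallest_rectangles(striped_coordinates):
--     biggest_area = 0
--     smallest_area = float('inf')
--     biggest_rect = None
--     smallest_rect = None
--
--     for rect in striped_coordinates:
--         x, y, w, h = rect
--         area = w * h
--
--         if area > biggest_area:
--             biggest_area = area
--             biggest_rect = rect
--         if area < smallest_area:
--             smallest_area = area
--             smallest_rect = rect
--
--     return biggest_rect or (0, 0, 0, 0), smallest_rect or (0, 0, 0, 0)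
-- ===== SOURCE B (Python) =====
-- def find_biggest_smallest_rectangles(striped_coordinates):
--     rects = list(striped_coordinates)
--     if not rects:
--         return (0, 0, 0, 0), (0, 0, 0, 0)
--     area = lambda r: r[2] * r[3]
--     # the biggest rectangle is only ever chosen among positive-area ones
--     positive = [r for r in rects if area(r) > 0]
--     biggest = max(positive, key=area) if positive else (0, 0, 0, 0)
--     smallest = min(rects, key=area)
--     return biggest, smallest
-- ===== Notes on version B (the rewrite author's own statement) =====
-- stated objective: idiomatic
-- what changed: Replaces the single interleaved four-variable tracking loop by two independent reductions: built-in max over the positive-area rectangles (the only ones A's '> 0'-seeded maximum can select) and built-in min over all rectangles, both with an area key.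
import Mathlib
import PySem

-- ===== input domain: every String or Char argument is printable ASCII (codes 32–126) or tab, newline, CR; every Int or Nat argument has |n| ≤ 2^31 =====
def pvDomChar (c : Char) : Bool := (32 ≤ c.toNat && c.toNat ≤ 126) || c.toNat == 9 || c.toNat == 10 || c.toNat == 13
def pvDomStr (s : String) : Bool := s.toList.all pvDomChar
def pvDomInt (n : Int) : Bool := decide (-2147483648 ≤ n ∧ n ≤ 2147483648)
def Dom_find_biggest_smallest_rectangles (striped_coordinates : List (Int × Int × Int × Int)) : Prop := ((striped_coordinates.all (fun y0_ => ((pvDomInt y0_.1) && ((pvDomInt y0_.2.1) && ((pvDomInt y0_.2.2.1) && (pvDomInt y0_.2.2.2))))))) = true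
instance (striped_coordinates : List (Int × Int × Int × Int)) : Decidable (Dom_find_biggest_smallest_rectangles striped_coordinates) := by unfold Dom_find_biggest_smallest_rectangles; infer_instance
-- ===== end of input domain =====

-- B replaces A's single interleaved four-variable tracking loop by two independent
-- reductions (max over the positive-area rectangles, min over all) — more idiomatic, same cost.


-- ===== PORT A =====
-- loop body of A: state = (biggest_area, smallest_area, biggest_rect, smallest_rect);
-- smallest_area is Option Int with none = float('inf') (every int compares below it)
def pvStepA (s : Int × Option Int × Option (Int × Int × Int × Int) × Option (Int × Int × Int × Int))
    (rect : Int × Int × Int × Int) :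
    Int × Option Int × Option (Int × Int × Int × Int) × Option (Int × Int × Int × Int) :=
  let area := rect.2.2.1 * rect.2.2.2
  let big := if area > s.1 then (area, some rect) else (s.1, s.2.2.1)
  let sml := match s.2.1 with
    | none => (some area, some rect)
    | some v => if area < v then (some area, some rect) else (s.2.1, s.2.2.2)
  (big.1, sml.1, big.2, sml.2)

def find_biggest_smallest_rectangles (striped_coordinates : List (Int × Int × Int × Int)) : (Int × Int × Int × Int) × (Int × Int × Int × Int) :=
  let st := striped_coordinates.foldl pvStepA (0, none, none, none)
  (st.2.2.1.getD (0, 0, 0, 0), st.2.2.2.getD (0, 0, 0, 0))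

-- ===== PORT B =====
def find_biggest_smallest_rectangles_alt (striped_coordinates : List (Int × Int × Int × Int)) : (Int × Int × Int × Int) × (Int × Int × Int × Int) :=
  if striped_coordinates.isEmpty then ((0, 0, 0, 0), (0, 0, 0, 0))
  else
    let area := fun (r : Int × Int × Int × Int) => r.2.2.1 * r.2.2.2
    let positive := striped_coordinates.filter (fun r => area r > 0)
    let biggest := if positive.isEmpty then (0, 0, 0, 0)
      else (PySem.List.max? positive area).getD (0, 0, 0, 0)
    let smallest := (PySem.List.min? striped_coordinates area).getD (0, 0, 0, 0)
    (biggest, smallest)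

-- ===== PRECONDITION & SPEC =====
def Spec_find_biggest_smallest_rectangles (striped_coordinates : List (Int × Int × Int × Int)) (out : (Int × Int × Int × Int) × (Int × Int × Int × Int)) : Prop := out = find_biggest_smallest_rectangles_alt striped_coordinates
instance (striped_coordinates : List (Int × Int × Int × Int)) (out : (Int × Int × Int × Int) × (Int × Int × Int × Int)) : Decidable (Spec_find_biggest_smallest_rectangles striped_coordinates out) := by unfold Spec_find_biggest_smallest_rectangles; infer_instance

-- ===== CLAIM (what is proved, stated in full; the proofs are below) =====
def Claim_equal_find_biggest_smallest_rectangles : Prop := ∀ (striped_coordinates : List (Int × Int × Int × Int)), Dom_find_biggest_smallest_rectangles striped_coordinates → Spec_find_biggest_smallest_rectangles striped_coordinates (find_biggest_smallest_rectangles striped_coordinates)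

-- ===== LEMMAS AND PROOFS =====

-- biggest_rect slot of A's loop = max?'s fold over the positive-area sublist
lemma pvMaxLoop (xs : List (Int × Int × Int × Int)) :
    ∀ (ba : Int) (sa : Option Int) (br sr : Option (Int × Int × Int × Int)),
    (br = none ∧ ba = 0 ∨ ∃ r, br = some r ∧ ba = r.2.2.1 * r.2.2.2 ∧ 0 < r.2.2.1 * r.2.2.2) →
    (xs.foldl pvStepA (ba, sa, br, sr)).2.2.1 =
        (xs.filter (fun r => r.2.2.1 * r.2.2.2 > 0)).foldl
          (fun acc x => match acc with
            | none => some x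
            | some m => if m.2.2.1 * m.2.2.2 < x.2.2.1 * x.2.2.2 then some x else some m) br := by
  induction xs with
  | nil => intro ba sa br sr _; rfl
  | cons hd tl ih =>
    intro ba sa br sr hB
    simp only [List.foldl_cons, List.filter_cons, pvStepA, decide_eq_true_eq, gt_iff_lt]
    by_cases hpos : 0 < hd.2.2.1 * hd.2.2.2
    · rw [if_pos hpos]
      rcases hB with ⟨hbr, hba⟩ | ⟨m, hbr, hba, hmp⟩
      · subst hbr; subst hba
        rw [if_pos hpos]
        simp only [List.foldl_cons]
        exact ih _ _ _ _ (Or.inr ⟨hd, rfl, rfl, hpos⟩)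
      · subst hbr; subst hba
        simp only [List.foldl_cons]
        by_cases hgt : m.2.2.1 * m.2.2.2 < hd.2.2.1 * hd.2.2.2
        · rw [if_pos hgt]
          show (List.foldl pvStepA _ tl).2.2.1 = _
          rw [show (if m.2.2.1 * m.2.2.2 < hd.2.2.1 * hd.2.2.2 then some hd else some m) = some hd
            from if_pos hgt]
          exact ih _ _ _ _ (Or.inr ⟨hd, rfl, rfl, hpos⟩)
        · rw [if_neg hgt]
          show (List.foldl pvStepA _ tl).2.2.1 = _
          rw [show (if m.2.2.1 * m.2.2.2 < hd.2.2.1 * hd.2.2.2 then some hd else some m) = some m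
            from if_neg hgt]
          exact ih _ _ _ _ (Or.inr ⟨m, rfl, rfl, hmp⟩)
    · rw [if_neg hpos]
      have hnle : ¬ (ba < hd.2.2.1 * hd.2.2.2) := by
        rcases hB with ⟨_, hba⟩ | ⟨r, _, hba, hrp⟩ <;> subst hba <;> omega
      rw [if_neg hnle]
      exact ih _ _ _ _ hB

-- smallest_rect slot of A's loop = min?'s fold over the whole list
lemma pvMinLoop (xs : List (Int × Int × Int × Int)) :
    ∀ (ba : Int) (sa : Option Int) (br sr : Option (Int × Int × Int × Int)),
    (sa = none ∧ sr = none ∨ ∃ r, sr = some r ∧ sa = some (r.2.2.1 * r.2.2.2)) →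
    (xs.foldl pvStepA (ba, sa, br, sr)).2.2.2 =
        xs.foldl
          (fun acc x => match acc with
            | none => some x
            | some m => if x.2.2.1 * x.2.2.2 < m.2.2.1 * m.2.2.2 then some x else some m) sr := by
  induction xs with
  | nil => intro ba sa br sr _; rfl
  | cons hd tl ih =>
    intro ba sa br sr hS
    simp only [List.foldl_cons, pvStepA]
    rcases hS with ⟨hsa, hsr⟩ | ⟨n, hsr, hsa⟩
    · subst hsa; subst hsr
      exact ih _ _ _ _ (Or.inr ⟨hd, rfl, rfl⟩)
    · subst hsr; subst hsa
      by_cases hlt : hd.2.2.1 * hd.2.2.2 < n.2.2.1 * n.2.2.2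
      · simpa [hlt] using ih _ _ _ _ (Or.inr ⟨hd, rfl, rfl⟩)
      · simpa [hlt] using ih _ _ _ _ (Or.inr ⟨n, rfl, rfl⟩)

-- ===== VERDICT (by name: the statement is the Claim_ definition above) =====
theorem find_biggest_smallest_rectangles_spec : Claim_equal_find_biggest_smallest_rectangles := by
  intro xs _
  show _ = _
  cases xs with
  | nil => rfl
  | cons hd tl =>
    have h1 := pvMaxLoop (hd :: tl) 0 none none none (Or.inl ⟨rfl, rfl⟩)
    have h2 := pvMinLoop (hd :: tl) 0 none none none (Or.inl ⟨rfl, rfl⟩)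
    unfold find_biggest_smallest_rectangles find_biggest_smallest_rectangles_alt
    simp only [List.isEmpty_cons, Bool.false_eq_true, if_false]
    refine Prod.ext ?_ ?_
    · show (_ : Option _).getD _ = _
      rw [h1]
      by_cases he : ((hd :: tl).filter (fun r => r.2.2.1 * r.2.2.2 > 0)).isEmpty = true
      · rw [if_pos he, List.isEmpty_iff.mp he]
        rfl
      · rw [if_neg he]
        show _ = (PySem.List.max? _ _).getD _
        unfold PySem.List.max?
        congr 2
        funext acc x
        cases acc <;> rfl
    · show (_ : Option _).getD _ = _
      rw [h2]
      show _ = (PySem.List.min? _ _).getD _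
      unfold PySem.List.min?
      congr 2
      funext acc x
      cases acc <;> rfl
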